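-- pv_equiv track=rewrite | github.com/spatula1/certificates | Certificate-Generator(pdf)/makeDocs/parseLaneChart.py | removeChar
-- ===== SOURCE A (Python) =====
-- def removeChar(text: str) -> str:
--     lines = text.strip().split('\n')
--     chars = ["9", "8", "7", "0", "LANE", "#", ":", "PM"]
--     filtered_lines = []
--
--     for line in lines:
--         modified_line = line
--         for char in chars:
--             # Replace the specific character with an empty string
--             modified_line = modified_line.replace(char, '')
--         # Append the modified line to the filtered lines after all characters are removed
--         filtered_lines.append(modified_line)
--
--     # Join the filtered lines back into a single string with newlines
--     result = '\n'.join(filtered_lines)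
--     return result
-- ===== SOURCE B (Python) =====
-- def removeChar(text: str) -> str:
--     # No substring to remove contains a newline, so there is no need to
--     # split into lines: process the whole stripped string in one go.
--     result = text.strip()
--     result = ''.join(c for c in result if c not in "9870")
--     result = result.replace("LANE", "")
--     result = ''.join(c for c in result if c not in "#:")
--     return result.replace("PM", "")
-- ===== Notes on version B (the rewrite author's own statement) =====
-- stated objective: simpler
-- what changed: Drops the line-split/rejoin and the nested per-line loop over the 8 substrings: B strips once, removes the six single characters with two character-filter passes, and does just the two real substring replaces (LANE, PM) on the whole string.
import Mathlib
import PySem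

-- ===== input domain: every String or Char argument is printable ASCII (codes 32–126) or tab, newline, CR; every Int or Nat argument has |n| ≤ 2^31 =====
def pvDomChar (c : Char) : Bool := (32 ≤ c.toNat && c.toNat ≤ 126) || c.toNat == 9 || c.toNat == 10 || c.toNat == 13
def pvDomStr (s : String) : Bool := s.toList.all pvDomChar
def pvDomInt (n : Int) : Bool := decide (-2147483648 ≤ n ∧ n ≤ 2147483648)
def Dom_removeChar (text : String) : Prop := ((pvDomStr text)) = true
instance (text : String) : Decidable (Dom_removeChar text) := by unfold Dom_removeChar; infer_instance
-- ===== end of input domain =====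

-- B drops A's line-split/rejoin and its nested per-line loop: since no removed substring
-- contains a newline, B strips once and processes the whole string — two character-filter
-- passes for the six single characters and the two real substring replaces (LANE, PM).

-- ===== PORT A =====
def removeChar (text : String) : String :=
  -- text.strip().split('\n'); sep "\n" ≠ "" so split? is always some
  let lines : List String := (PySem.Str.split? (PySem.Str.strip text) "\n").getD []
  let chars : List String := ["9", "8", "7", "0", "LANE", "#", ":", "PM"]
  -- for line in lines: for char in chars: modified_line = modified_line.replace(char, ''); append
  let filtered_lines : List String :=
    lines.foldl (fun acc line =>
      acc ++ [chars.foldl (fun m c => PySem.Str.replace m c "") line]) []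
  -- '\n'.join(filtered_lines)
  PySem.Str.join "\n" filtered_lines

-- ===== PORT B =====
def removeChar_alt (text : String) : String :=
  let r1 := PySem.Str.strip text
  -- ''.join(c for c in r if c not in "9870") : a character filter pass
  let r2 := String.ofList (r1.toList.filter (fun c => !("9870".toList.contains c)))
  let r3 := PySem.Str.replace r2 "LANE" ""
  let r4 := String.ofList (r3.toList.filter (fun c => !("#:".toList.contains c)))
  PySem.Str.replace r4 "PM" ""

-- ===== PRECONDITION & SPEC =====
def Spec_removeChar (text : String) (out : String) : Prop := out = removeChar_alt text
instance (text : String) (out : String) : Decidable (Spec_removeChar text out) := by unfold Spec_removeChar; infer_instance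

-- ===== CLAIM (what is proved, stated in full; the proofs are below) =====
def Claim_equal_removeChar : Prop := ∀ (text : String), Dom_removeChar text → Spec_removeChar text (removeChar text)

-- ===== LEMMAS AND PROOFS =====

-- 'rep o os' is Python's s.replace(o::os, '') written as a plain structural recursion.
def rep (o : Char) (os : List Char) : List Char → List Char
  | [] => []
  | c :: t => if (o :: os).isPrefixOf (c :: t) then rep o os (t.drop os.length) else c :: rep o os t
  termination_by s => s.length
  decreasing_by all_goals simp

theorem replace_go_eq (o : Char) (os : List Char) :
    ∀ (fuel : Nat) (l acc : List Char), l.length ≤ fuel →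
      PySem.Chars.replace.go (o :: os) [] fuel l acc = acc.reverse ++ rep o os l := by
  intro fuel
  induction fuel with
  | zero =>
    intro l acc h
    have : l = [] := by cases l <;> simp_all
    subst this; simp [PySem.Chars.replace.go, rep.eq_1]
  | succ f ih =>
    intro l acc h
    cases l with
    | nil => simp [PySem.Chars.replace.go, rep.eq_1]
    | cons c t =>
      rw [PySem.Chars.replace.go]
      by_cases hp : (o :: os).isPrefixOf (c :: t)
      · simp only [hp, if_true, List.reverse_nil, List.nil_append]
        rw [ih _ _ (by have := List.length_drop (l := t) (i := os.length); simp at h ⊢; omega)]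
        rw [rep.eq_2]; simp [hp]
      · rw [if_neg (by simp [hp]), ih _ _ (by simp at h ⊢; omega), rep.eq_2]
        simp [hp]

theorem replace_eq_rep (o : Char) (os s : List Char) :
    PySem.Chars.replace s (o :: os) [] = rep o os s := by
  rw [PySem.Chars.replace, if_neg (by simp), replace_go_eq o os s.length s [] le_rfl]
  simp

-- 'spl' is s.split('\n') written as a plain structural recursion.
def spl : List Char → List (List Char)
  | [] => [[]]
  | c :: t => if c = '\n' then [] :: spl t else (spl t).modifyHead (c :: ·)

theorem spl_head (s : List Char) :
    spl s = s.takeWhile (· ≠ '\n') :: (spl s).tail := by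
  induction s with
  | nil => simp [spl]
  | cons c t ih =>
    by_cases hc : c = '\n'
    · subst hc; simp [spl, List.takeWhile]
    · rw [spl, if_neg hc, ih]
      simp [List.takeWhile, hc]

theorem splitOn_go_eq :
    ∀ (fuel : Nat) (l cur : List Char) (accs : List (List Char)), l.length < fuel →
      PySem.Chars.splitOn.go ['\n'] fuel l cur accs =
        accs.reverse ++ (spl l).modifyHead (cur.reverse ++ ·) := by
  intro fuel
  induction fuel with
  | zero => omega
  | succ f ih =>
    intro l cur accs h
    cases l with
    | nil => simp [PySem.Chars.splitOn.go, spl]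
    | cons c t =>
      rw [PySem.Chars.splitOn.go]
      by_cases hc : c = '\n'
      · subst hc
        rw [if_pos (by simp [List.isPrefixOf]), ih _ _ _ (by simp at h ⊢; omega)]
        have hs : spl ('\n' :: t) = [] :: spl t := by rw [spl]; simp
        rw [hs, show List.drop ['\n'].length ('\n' :: t) = t from rfl]
        have hid : List.modifyHead (fun x : List Char => [].reverse ++ x) (spl t) = spl t := by
          cases h2 : spl t <;> simp
        rw [hid]; simp
      · rw [if_neg (by simp [List.isPrefixOf]; exact fun h' => absurd h'.symm hc),
            ih _ _ _ (by simp at h ⊢; omega)]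
        rw [spl, if_neg hc, spl_head t]
        simp

theorem splitOn_eq_spl (s : List Char) : PySem.Chars.splitOn s ['\n'] = spl s := by
  rw [PySem.Chars.splitOn, splitOn_go_eq (s.length + 1) s [] [] (by omega)]
  rw [spl_head s]
  simp

theorem join_spl (s : List Char) : PySem.Chars.join ['\n'] (spl s) = s := by
  induction s with
  | nil => simp [spl, PySem.Chars.join, List.intercalate]
  | cons c t ih =>
    by_cases hc : c = '\n'
    · subst hc
      rw [spl, if_pos rfl]
      rw [spl_head t] at ih ⊢
      simpa [PySem.Chars.join, List.intercalate] using ih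
    · rw [spl, if_neg hc, spl_head t]
      rw [spl_head t] at ih
      cases htail : (spl t).tail with
      | nil => rw [htail] at ih; simpa [PySem.Chars.join, List.intercalate] using ih
      | cons x xs =>
        rw [htail] at ih
        simp only [PySem.Chars.join, List.intercalate] at ih ⊢
        simp_all

theorem spl_append_no_nl (p r : List Char) (hp : '\n' ∉ p) :
    spl (p ++ r) = (spl r).modifyHead (p ++ ·) := by
  induction p with
  | nil => cases h : spl r <;> simp [h]
  | cons a p ih =>
    have ha : a ≠ '\n' := fun h => hp (h ▸ List.mem_cons_self)
    rw [List.cons_append, spl, if_neg ha, ih (fun h => hp (List.mem_cons_of_mem _ h)),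
        List.modifyHead_modifyHead]
    rfl

theorem rep_append_self (o : Char) (os x : List Char) :
    rep o os ((o :: os) ++ x) = rep o os x := by
  rw [show (o :: os) ++ x = o :: (os ++ x) from rfl, rep.eq_2,
      if_pos (by rw [List.isPrefixOf_iff_prefix]; exact ⟨x, by simp⟩),
      List.drop_left]

theorem rep_cons_append (o : Char) (os x : List Char) :
    rep o os (o :: (os ++ x)) = rep o os x := by
  simpa using rep_append_self o os x

theorem rep_commute (o : Char) (os : List Char) (hnl : '\n' ∉ o :: os) :
    ∀ s : List Char, spl (rep o os s) = (spl s).map (rep o os) := by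
  intro s
  induction s using rep.induct o os with
  | case1 => simp [rep.eq_1, spl]
  | case2 c t hp ih =>
    -- (o :: os) is a prefix of c :: t
    obtain ⟨r, hr⟩ := List.isPrefixOf_iff_prefix.mp hp
    have hrdrop : r = List.drop os.length t := by
      have := congrArg (List.drop (os.length + 1)) hr
      simpa [List.drop_left'] using this
    rw [show c :: t = (o :: os) ++ r from hr.symm, rep_append_self,
        spl_append_no_nl _ _ hnl]
    rw [← hrdrop] at ih
    rw [ih, spl_head r]
    simp [rep_cons_append]
  | case3 c t hp ih =>
    rw [rep.eq_2, if_neg hp]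
    by_cases hc : c = '\n'
    · subst hc
      rw [spl, if_pos rfl, spl, if_pos rfl, ih]
      simp [rep.eq_1]
    · rw [spl, if_neg hc, spl, if_neg hc, ih, spl_head t]
      have hnp : ¬ ((o :: os).isPrefixOf (c :: t.takeWhile (· ≠ '\n')) = true) := by
        intro hpre
        exact hp (List.isPrefixOf_iff_prefix.mpr
          ((List.isPrefixOf_iff_prefix.mp hpre).trans
            (List.cons_prefix_cons.mpr ⟨rfl, List.takeWhile_prefix _⟩)))
      simp only [List.map_cons, List.modifyHead_cons]
      rw [rep.eq_2, if_neg hnp]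

theorem rep_single_eq_filter (o : Char) (s : List Char) :
    rep o [] s = s.filter (fun c => c != o) := by
  induction s with
  | nil => simp [rep.eq_1]
  | cons c t ih =>
    rw [rep.eq_2]
    by_cases h : c = o
    · subst h; simp [List.isPrefixOf, ih]
    · rw [if_neg (by simp [List.isPrefixOf]; exact fun h' => h h'.symm)]
      simp [bne, h, ih]

-- foldl that appends singletons is map
theorem foldl_append_singleton {α β : Type} (f : α → β) (l : List α) (acc : List β) :
    l.foldl (fun a x => a ++ [f x]) acc = acc ++ l.map f := by
  induction l generalizing acc with
  | nil => simp
  | cons x t ih => simp [List.foldl, ih]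

-- the four leading single-char removals are one filter pass
theorem rep_digits (s : List Char) :
    rep '0' [] (rep '7' [] (rep '8' [] (rep '9' [] s))) =
      s.filter (fun c => !("9870".toList.contains c)) := by
  simp only [rep_single_eq_filter, List.filter_filter]
  apply List.filter_congr
  intro c _
  show (c != '0' && (c != '7' && (c != '8' && c != '9'))) = _
  by_cases h9 : c = '9' <;> by_cases h8 : c = '8' <;> by_cases h7 : c = '7' <;>
    by_cases h0 : c = '0' <;> simp_all [bne]

theorem rep_sym (s : List Char) :
    rep ':' [] (rep '#' [] s) = s.filter (fun c => !("#:".toList.contains c)) := by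
  simp only [rep_single_eq_filter, List.filter_filter]
  apply List.filter_congr
  intro c _
  show (c != ':' && c != '#') = _
  by_cases hh : c = '#' <;> by_cases hc : c = ':' <;> simp_all [bne]

-- the eight sequential removals, as one function on a line
def repChain (s : List Char) : List Char :=
  rep 'P' ['M'] (rep ':' [] (rep '#' [] (rep 'L' ['A', 'N', 'E']
    (rep '0' [] (rep '7' [] (rep '8' [] (rep '9' [] s)))))))

theorem spl_repChain (s : List Char) : spl (repChain s) = (spl s).map repChain := by
  unfold repChain
  rw [rep_commute 'P' ['M'] (by decide), rep_commute ':' [] (by decide),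
      rep_commute '#' [] (by decide), rep_commute 'L' ['A', 'N', 'E'] (by decide),
      rep_commute '0' [] (by decide), rep_commute '7' [] (by decide),
      rep_commute '8' [] (by decide), rep_commute '9' [] (by decide)]
  simp [List.map_map, Function.comp_def]

-- a function that maps over the lines of a string (via spl) and back
theorem lineLocal_join (f : List Char → List Char)
    (hf : ∀ s, spl (f s) = (spl s).map f) (s : List Char) :
    PySem.Chars.join ['\n'] ((spl s).map f) = f s := by
  rw [← hf, join_spl]

-- ===== VERDICT (by name: the statement is the Claim_ definition above) =====
theorem removeChar_spec : Claim_equal_removeChar := by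
  intro text _
  unfold Spec_removeChar removeChar removeChar_alt
  rw [← String.toList_inj]
  dsimp only
  have c9 : "9".toList = ['9'] := by decide
  have c8 : "8".toList = ['8'] := by decide
  have c7 : "7".toList = ['7'] := by decide
  have c0 : "0".toList = ['0'] := by decide
  have cL : "LANE".toList = ['L', 'A', 'N', 'E'] := by decide
  have cH : "#".toList = ['#'] := by decide
  have cC : ":".toList = [':'] := by decide
  have cP : "PM".toList = ['P', 'M'] := by decide
  have cE : "".toList = [] := by decide
  have cN : "\n".toList = ['\n'] := by decide
  -- the line-splitting of A: split? with a nonempty separator is `some`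
  have h1 := PySem.Str.split?_map (PySem.Str.strip text) "\n"
  cases hsp : PySem.Str.split? (PySem.Str.strip text) "\n" with
  | none => rw [hsp, cN] at h1; simp [PySem.Chars.split?] at h1
  | some L =>
    rw [hsp, cN] at h1
    simp only [PySem.Chars.split?, List.isEmpty_cons, Option.map_some] at h1
    simp only [Bool.false_eq_true, if_false] at h1
    replace h1 : List.map String.toList L = PySem.Chars.splitOn (PySem.Str.strip text).toList ['\n'] := by
      simpa using h1
    simp only [Option.getD_some, foldl_append_singleton, List.nil_append,
               List.foldl_cons, List.foldl_nil]
    rw [PySem.Str.toList_join, cN, List.map_map]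
    have hF : ∀ line : String,
        (PySem.Str.replace (PySem.Str.replace (PySem.Str.replace (PySem.Str.replace
          (PySem.Str.replace (PySem.Str.replace (PySem.Str.replace (PySem.Str.replace
            line "9" "") "8" "") "7" "") "0" "") "LANE" "") "#" "") ":" "") "PM" "").toList
          = repChain line.toList := by
      intro line
      simp only [PySem.Str.toList_replace, c9, c8, c7, c0, cL, cH, cC, cP, cE,
                 replace_eq_rep, repChain]
    simp only [Function.comp_def]
    rw [List.map_congr_left (fun line (_ : line ∈ L) => hF line),
        show (fun line => repChain line.toList) = repChain ∘ String.toList from rfl,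
        ← List.map_map, h1, splitOn_eq_spl, lineLocal_join repChain spl_repChain]
    -- B's side
    simp only [PySem.Str.toList_replace, String.toList_ofList, cL, cP, cE, replace_eq_rep]
    rw [← rep_digits, ← rep_sym, repChain]
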